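-- pv_equiv track=rewrite | github.com/RichardNorth1/MediChat | src/chat.py | escalation_check
-- ===== SOURCE A (Python) =====
-- def escalation_check(input_text):
--     escalate_text = [
--             "I need to speak to a human",
--             "Can I talk to a real person?",
--             "I want to escalate this issue",
--             "I need help from a human",
--             "Can you transfer me to a human agent?",
--             "I am not satisfied with this response",
--             "I need more assistance",
--             "This is not helping",
--             "I need to talk to someone",
--             "Can you connect me to a human?",
--             "I need to speak with a representative",
--             "I want to talk to a human",
--             "I need human assistance",
--             "Can I get help from a person?",
--             "I need to escalate this",
--             "I need to speak to customer service",
--             "I want to talk to a support agent",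
--             "Can you escalate this issue?",
--             "I need to speak to someone in charge",
--             "I need to talk to a manager",
--             "can i speak to a doctor",
--             "can i speak to a nurse",
--             "can i speak to a physician",
--             "i need to speak to someone"
--         ]
--     return any(escalate_phrase in input_text.lower() for escalate_phrase in escalate_text)
-- ===== SOURCE B (Python) =====
-- def escalation_check(input_text):
--     # A lowered string contains no ASCII uppercase letters, so the 20 phrases in A's
--     # list that contain an uppercase letter can never match; only the four all-lowercase
--     # phrases are live.  Scan the lowered text position by position, testing those four
--     # factored as a tiny prefix tree: "can i speak to a " + {doctor, nurse, physician},
--     # plus the standalone "i need to speak to someone".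
--     lowered = input_text.lower()
--     n = len(lowered)
--     for i in range(n + 1):
--         if lowered.startswith("can i speak to a ", i):
--             j = i + 17
--             if (lowered.startswith("doctor", j)
--                     or lowered.startswith("nurse", j)
--                     or lowered.startswith("physician", j)):
--                 return True
--         if lowered.startswith("i need to speak to someone", i):
--             return True
--     return False
-- ===== Notes on version B (the rewrite author's own statement) =====
-- stated objective: alternative
-- what changed: B drops the 20 phrases containing uppercase letters (they can never occur in a lowered text), factors the four live lowercase phrases into a small prefix tree, and does one position-major sweep of the lowered text instead of one substring scan per phrase.
import Mathlib
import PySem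

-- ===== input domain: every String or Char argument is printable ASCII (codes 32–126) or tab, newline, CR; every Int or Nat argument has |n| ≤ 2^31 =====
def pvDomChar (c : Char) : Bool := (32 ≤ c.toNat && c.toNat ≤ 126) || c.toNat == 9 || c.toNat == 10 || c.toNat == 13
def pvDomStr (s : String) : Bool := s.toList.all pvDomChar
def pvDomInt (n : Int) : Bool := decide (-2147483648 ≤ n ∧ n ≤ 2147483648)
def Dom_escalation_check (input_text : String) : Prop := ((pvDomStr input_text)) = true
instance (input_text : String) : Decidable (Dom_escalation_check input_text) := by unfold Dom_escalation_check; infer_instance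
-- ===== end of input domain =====

-- B drops the 20 phrases containing uppercase letters (they can never occur in a lowered
-- text), factors the four live lowercase phrases into a small prefix tree, and does one
-- position-major sweep of the lowered text (objective: alternative).

-- ===== PORT A =====
-- A's local escalate_text list, verbatim
def pvEscalateText : List String := [
  "I need to speak to a human",
  "Can I talk to a real person?",
  "I want to escalate this issue",
  "I need help from a human",
  "Can you transfer me to a human agent?",
  "I am not satisfied with this response",
  "I need more assistance",
  "This is not helping",
  "I need to talk to someone",
  "Can you connect me to a human?",
  "I need to speak with a representative",
  "I want to talk to a human",
  "I need human assistance",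
  "Can I get help from a person?",
  "I need to escalate this",
  "I need to speak to customer service",
  "I want to talk to a support agent",
  "Can you escalate this issue?",
  "I need to speak to someone in charge",
  "I need to talk to a manager",
  "can i speak to a doctor",
  "can i speak to a nurse",
  "can i speak to a physician",
  "i need to speak to someone"]

-- any(escalate_phrase in input_text.lower() for escalate_phrase in escalate_text)
def escalation_check (input_text : String) : Bool :=
  pvEscalateText.any (fun escalate_phrase =>
    PySem.Str.isIn escalate_phrase (PySem.Str.lower input_text))

-- ===== PORT B =====
-- the per-position test of Source B's loop body, on the tail lowered[i:]
-- (lowered.startswith(p, i+17) is exactly: p.toList is a prefix of (lowered[i:]).drop 17)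
def pvHit (l : List Char) : Bool :=
  (PySem.Chars.startswith l "can i speak to a ".toList &&
    (PySem.Chars.startswith (l.drop 17) "doctor".toList ||
     PySem.Chars.startswith (l.drop 17) "nurse".toList ||
     PySem.Chars.startswith (l.drop 17) "physician".toList)) ||
  PySem.Chars.startswith l "i need to speak to someone".toList

-- Source B's 'for i in range(n + 1)' over start positions = recursion over the tails of lowered
def pvScan : List Char → Bool
  | [] => pvHit []
  | c :: rest => pvHit (c :: rest) || pvScan rest

def escalation_check_alt (input_text : String) : Bool :=
  pvScan (PySem.Chars.lower input_text.toList)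

-- ===== PRECONDITION & SPEC =====
def Spec_escalation_check (input_text : String) (out : Bool) : Prop := out = escalation_check_alt input_text
instance (input_text : String) (out : Bool) : Decidable (Spec_escalation_check input_text out) := by unfold Spec_escalation_check; infer_instance

-- ===== CLAIM =====
def Claim_equal_escalation_check : Prop := ∀ (input_text : String), Dom_escalation_check input_text → Spec_escalation_check input_text (escalation_check input_text)

-- ===== LEMMAS AND PROOFS =====

-- the four live phrases, as an infix condition (proof-side characterisation of B)
def pvHitsInfix (l : List Char) : Prop :=
  "can i speak to a doctor".toList <:+: l ∨ "can i speak to a nurse".toList <:+: l ∨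
  "can i speak to a physician".toList <:+: l ∨ "i need to speak to someone".toList <:+: l

theorem pv_prefix_append_iff (a b l : List Char) :
    (a ++ b) <+: l ↔ a <+: l ∧ b <+: l.drop a.length := by
  constructor
  · rintro ⟨t, rfl⟩
    exact ⟨⟨b ++ t, by simp⟩, by simp⟩
  · rintro ⟨⟨t, rfl⟩, hb⟩
    simp at hb
    obtain ⟨u, rfl⟩ := hb
    exact ⟨u, by simp⟩

theorem pv_toNat_ofNat (n : Nat) (h : n < 55296) : (Char.ofNat n).toNat = n := by
  unfold Char.ofNat
  rw [dif_pos (Or.inl h)]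
  simp [Char.ofNatAux, Char.toNat]

theorem pv_split (b l : List Char) :
    ("can i speak to a ".toList ++ b) <+: l ↔ "can i speak to a ".toList <+: l ∧ b <+: l.drop 17 := by
  rw [pv_prefix_append_iff, show "can i speak to a ".toList.length = 17 from rfl]

theorem pvHit_iff (l : List Char) :
    pvHit l = true ↔
      ("can i speak to a doctor".toList <+: l ∨ "can i speak to a nurse".toList <+: l ∨
       "can i speak to a physician".toList <+: l ∨ "i need to speak to someone".toList <+: l) := by
  rw [show "can i speak to a doctor".toList = "can i speak to a ".toList ++ "doctor".toList from rfl,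
      show "can i speak to a nurse".toList = "can i speak to a ".toList ++ "nurse".toList from rfl,
      show "can i speak to a physician".toList = "can i speak to a ".toList ++ "physician".toList from rfl]
  rw [pv_split, pv_split, pv_split]
  simp only [pvHit, Bool.or_eq_true, Bool.and_eq_true, PySem.Chars.startswith_iff]
  constructor
  · rintro (⟨ha, (hd | hn) | hp⟩ | hs)
    · exact Or.inl ⟨ha, hd⟩
    · exact Or.inr (Or.inl ⟨ha, hn⟩)
    · exact Or.inr (Or.inr (Or.inl ⟨ha, hp⟩))
    · exact Or.inr (Or.inr (Or.inr hs))
  · rintro (⟨ha, hd⟩ | ⟨ha, hn⟩ | ⟨ha, hp⟩ | hs)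
    · exact Or.inl ⟨ha, Or.inl (Or.inl hd)⟩
    · exact Or.inl ⟨ha, Or.inl (Or.inr hn)⟩
    · exact Or.inl ⟨ha, Or.inr hp⟩
    · exact Or.inr hs

theorem pvScan_iff (l : List Char) : pvScan l = true ↔ pvHitsInfix l := by
  induction l with
  | nil => simp only [pvScan, pvHit_iff, pvHitsInfix, List.prefix_nil, List.infix_nil]
  | cons c rest ih =>
    simp only [pvScan, Bool.or_eq_true, pvHit_iff, ih, pvHitsInfix, List.infix_cons_iff]
    constructor
    · rintro ((h|h|h|h) | (h|h|h|h))
      · exact Or.inl (Or.inl h)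
      · exact Or.inr (Or.inl (Or.inl h))
      · exact Or.inr (Or.inr (Or.inl (Or.inl h)))
      · exact Or.inr (Or.inr (Or.inr (Or.inl h)))
      · exact Or.inl (Or.inr h)
      · exact Or.inr (Or.inl (Or.inr h))
      · exact Or.inr (Or.inr (Or.inl (Or.inr h)))
      · exact Or.inr (Or.inr (Or.inr (Or.inr h)))
    · rintro ((h|h) | (h|h) | (h|h) | (h|h))
      · exact Or.inl (Or.inl h)
      · exact Or.inr (Or.inl h)
      · exact Or.inl (Or.inr (Or.inl h))
      · exact Or.inr (Or.inr (Or.inl h))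
      · exact Or.inl (Or.inr (Or.inr (Or.inl h)))
      · exact Or.inr (Or.inr (Or.inr (Or.inl h)))
      · exact Or.inl (Or.inr (Or.inr (Or.inr h)))
      · exact Or.inr (Or.inr (Or.inr (Or.inr h)))

theorem pv_lower_no_upper (l : List Char) (c : Char)
    (hc : c ∈ PySem.Chars.lower l) : PySem.Chars.isupper c = false := by
  simp only [PySem.Chars.lower, List.mem_map] at hc
  obtain ⟨c', -, rfl⟩ := hc
  unfold PySem.Chars.lowerChar
  split_ifs with h
  · have hb : ('A' ≤ c' ∧ c' ≤ 'Z') := by simpa [PySem.Chars.isupper] using h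
    have h65 : 65 ≤ c'.toNat := hb.1
    have h90 : c'.toNat ≤ 90 := hb.2
    have hv : (Char.ofNat (c'.toNat + 32)).toNat = c'.toNat + 32 := pv_toNat_ofNat _ (by omega)
    simp only [PySem.Chars.isupper, Bool.and_eq_false_iff, decide_eq_false_iff_not]
    right
    intro hle
    have h3 : (Char.ofNat (c'.toNat + 32)).toNat ≤ ('Z' : Char).toNat := hle
    rw [hv] at h3
    have hz : ('Z' : Char).toNat = 90 := rfl
    omega
  · simpa [PySem.Chars.isupper] using h

-- an infix of a lowered text contains no uppercase character
theorem pv_infix_lower_no_upper (p l : List Char) (h : p <:+: PySem.Chars.lower l) :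
    p.all (fun c => !PySem.Chars.isupper c) = true := by
  rw [List.all_eq_true]
  intro c hc
  simp [pv_lower_no_upper l c (h.sublist.subset hc)]

-- among A's 24 phrases, the all-lowercase ones are exactly B's four
theorem pv_active_of_no_upper (p : String) (hp : p ∈ pvEscalateText)
    (hall : p.toList.all (fun c => !PySem.Chars.isupper c) = true) :
    p = "can i speak to a doctor" ∨ p = "can i speak to a nurse" ∨
    p = "can i speak to a physician" ∨ p = "i need to speak to someone" := by
  simp only [pvEscalateText, List.mem_cons, List.not_mem_nil, or_false] at hp
  rcases hp with rfl|rfl|rfl|rfl|rfl|rfl|rfl|rfl|rfl|rfl|rfl|rfl|rfl|rfl|rfl|rfl|rfl|rfl|rfl|rfl|rfl|rfl|rfl|rfl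
  all_goals first
    | exact Or.inl rfl
    | exact Or.inr (Or.inl rfl)
    | exact Or.inr (Or.inr (Or.inl rfl))
    | exact Or.inr (Or.inr (Or.inr rfl))
    | exact absurd hall (by decide)

-- ===== VERDICT =====
theorem escalation_check_spec : Claim_equal_escalation_check := by
  intro input_text _
  unfold Spec_escalation_check escalation_check escalation_check_alt
  rw [Bool.eq_iff_iff, pvScan_iff]
  simp only [List.any_eq_true, PySem.Str.isIn_iff_infix, PySem.Str.toList_lower]
  constructor
  · rintro ⟨p, hp, hinf⟩
    have h4 := pv_active_of_no_upper p hp (pv_infix_lower_no_upper _ _ hinf)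
    unfold pvHitsInfix
    rcases h4 with rfl | rfl | rfl | rfl
    · exact Or.inl hinf
    · exact Or.inr (Or.inl hinf)
    · exact Or.inr (Or.inr (Or.inl hinf))
    · exact Or.inr (Or.inr (Or.inr hinf))
  · rintro (h | h | h | h)
    · exact ⟨"can i speak to a doctor", by simp [pvEscalateText], h⟩
    · exact ⟨"can i speak to a nurse", by simp [pvEscalateText], h⟩
    · exact ⟨"can i speak to a physician", by simp [pvEscalateText], h⟩
    · exact ⟨"i need to speak to someone", by simp [pvEscalateText], h⟩
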